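-- pv_equiv track=rewrite | github.com/rpecuch/snp-identification | utils.py | trim_score
-- ===== SOURCE A (Python) =====
-- def trim_score(qual_score, sequence):
--     options = ['D','F']
--     # Initialize index and previous letter
--     i=0
--     prev_letter=None
--     # Loop through quality score
--     for letter in qual_score:
--         if prev_letter:
--             # If consecutive D or F
--             if prev_letter in options and letter in options:
--                 # Identify where to trim string
--                 split = i-1
--                 # Trim quality score and sequence
--                 qual_score = qual_score[0:split]
--                 sequence = sequence[0:split]
--                 # Stop after trim
--                 break
--         # Increment
--         prev_letter = letter
--         i+=1
--
--     return qual_score, sequence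
-- ===== SOURCE B (Python) =====
-- import re
--
-- def trim_score(qual_score, sequence):
--     m = re.search(r'[DF][DF]', qual_score)
--     if m:
--         split = m.start()
--         return qual_score[:split], sequence[:split]
--     return qual_score, sequence
-- ===== Notes on version B (the rewrite author's own statement) =====
-- stated objective: idiomatic
-- what changed: Replaces the manual index/previous-letter Python loop with a single re.search(r'[DF][DF]') call that locates the first adjacent D/F pair, then slices both strings at the match start.
import Mathlib
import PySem

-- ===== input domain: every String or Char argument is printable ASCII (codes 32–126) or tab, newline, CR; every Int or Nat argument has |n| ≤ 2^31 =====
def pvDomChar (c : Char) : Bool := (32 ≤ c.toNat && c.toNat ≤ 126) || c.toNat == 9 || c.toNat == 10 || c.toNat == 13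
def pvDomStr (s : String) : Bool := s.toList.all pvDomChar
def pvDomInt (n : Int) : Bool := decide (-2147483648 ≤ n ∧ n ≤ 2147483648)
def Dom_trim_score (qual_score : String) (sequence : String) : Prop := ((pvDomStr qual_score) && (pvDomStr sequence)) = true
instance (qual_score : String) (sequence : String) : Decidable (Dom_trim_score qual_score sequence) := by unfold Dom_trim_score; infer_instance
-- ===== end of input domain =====

-- B replaces A's manual index/prev-letter loop by one regex search for the first adjacent D/F pair (idiomatic; same return value).

-- ===== PORT A =====
-- the for-loop over qual_score with state (i, prev_letter); the early 'break' returns the trimmed pair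
def trim_score_loop (letters : List Char) (i : Int) (prev : Option Char)
    (qual_score : String) (sequence : String) : String × String :=
  match letters with
  | [] => (qual_score, sequence)
  | letter :: rest =>
    match prev with
    | some p =>
      if (p = 'D' ∨ p = 'F') ∧ (letter = 'D' ∨ letter = 'F') then
        -- split = i-1; qual_score[0:split], sequence[0:split]; break
        (PySem.Str.slice qual_score (some 0) (some (i - 1)),
         PySem.Str.slice sequence (some 0) (some (i - 1)))
      else trim_score_loop rest (i + 1) (some letter) qual_score sequence
    | none => trim_score_loop rest (i + 1) (some letter) qual_score sequence

def trim_score (qual_score : String) (sequence : String) : String × String :=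
  trim_score_loop qual_score.toList 0 none qual_score sequence

-- ===== PORT B =====
-- port of re.search(r'[DF][DF]', qual_score): index of the first match, scanning left to right
def findPairDF : List Char → Option Nat
  | a :: b :: rest =>
    if (a = 'D' ∨ a = 'F') ∧ (b = 'D' ∨ b = 'F') then some 0
    else (findPairDF (b :: rest)).map (· + 1)
  | _ => none

def trim_score_alt (qual_score : String) (sequence : String) : String × String :=
  match findPairDF qual_score.toList with
  | some split =>
    (PySem.Str.slice qual_score none (some (split : Int)),
     PySem.Str.slice sequence none (some (split : Int)))
  | none => (qual_score, sequence)

-- ===== PRECONDITION & SPEC =====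
def Spec_trim_score (qual_score : String) (sequence : String) (out : String × String) : Prop := out = trim_score_alt qual_score sequence
instance (qual_score : String) (sequence : String) (out : String × String) : Decidable (Spec_trim_score qual_score sequence out) := by unfold Spec_trim_score; infer_instance

-- ===== CLAIM (what is proved, stated in full; the proofs are below) =====
def Claim_equal_trim_score : Prop := ∀ (qual_score : String) (sequence : String), Dom_trim_score qual_score sequence → Spec_trim_score qual_score sequence (trim_score qual_score sequence)

-- ===== LEMMAS AND PROOFS =====

-- the loop from state (i, some p) computes exactly what findPairDF finds on p :: rest
theorem trim_score_loop_eq (letters : List Char) (p : Char) (i : Int)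
    (q s : String) :
    trim_score_loop letters i (some p) q s =
      match findPairDF (p :: letters) with
      | some j => (PySem.Str.slice q (some 0) (some (i - 1 + (j : Int))),
                   PySem.Str.slice s (some 0) (some (i - 1 + (j : Int))))
      | none => (q, s) := by
  induction letters generalizing p i with
  | nil => simp [trim_score_loop, findPairDF]
  | cons c rest ih =>
    by_cases h : (p = 'D' ∨ p = 'F') ∧ (c = 'D' ∨ c = 'F')
    · simp [trim_score_loop, findPairDF, h]
    · rw [show trim_score_loop (c :: rest) i (some p) q s =
            trim_score_loop rest (i + 1) (some c) q s by
          simp [trim_score_loop, h]]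
      rw [ih c (i + 1)]
      rw [show findPairDF (p :: c :: rest) = (findPairDF (c :: rest)).map (· + 1) by
          simp [findPairDF, h]]
      cases findPairDF (c :: rest) with
      | none => rfl
      | some j =>
        simp only [Option.map_some]
        have : i + 1 - 1 + (j : Int) = i - 1 + ((j + 1 : Nat) : Int) := by push_cast; ring
        rw [this]

theorem trim_score_eq_alt (q s : String) : trim_score q s = trim_score_alt q s := by
  unfold trim_score trim_score_alt
  cases hq : q.toList with
  | nil => simp [trim_score_loop, findPairDF]
  | cons c rest =>
    rw [show trim_score_loop (c :: rest) 0 none q s =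
          trim_score_loop rest 1 (some c) q s by simp [trim_score_loop]]
    rw [trim_score_loop_eq rest c 1 q s]
    cases h : findPairDF (c :: rest) with
    | none => rfl
    | some j => simp [PySem.Str.slice]

-- ===== VERDICT (by name: the statement is the Claim_ definition above) =====
theorem trim_score_spec : Claim_equal_trim_score := by
  intro q s _
  unfold Spec_trim_score
  exact trim_score_eq_alt q s
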